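-- pv_equiv track=rewrite | github.com/daniquel/AdventOfCode2021 | day03/day03.py | get_least_used
-- ===== SOURCE A (Python) =====
-- def get_least_used(elements, index):
--     count = {0: [], 1: []}
--     for elem in elements:
--         if elem[index] == '0':
--             count[0].append(elem)
--         else:  # elem[i] == '1':
--             count[1].append(elem)
--
--     if len(count[1]) >= len(count[0]):
--         return count[0]
--     else:
--         return count[1]
-- ===== SOURCE B (Python) =====
-- def get_least_used(elements, index):
--     # Stable-sort by the bit at `index` (zeros first), find the zeros/ones
--     # boundary, then return the smaller side of the split (zeros on a tie).
--     ordered = sorted(elements, key=lambda elem: elem[index] != '0')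
--     n = len(ordered)
--     k = 0
--     while k < n and ordered[k][index] == '0':
--         k += 1
--     if n - k >= k:
--         return ordered[:k]
--     else:
--         return ordered[k:]
-- ===== Notes on version B (the rewrite author's own statement) =====
-- stated objective: alternative
-- what changed: Replaces A's one-pass dual-partition into a dict of two lists by a stable sort on the bit at index, a boundary scan for the first '1', and a slice returning the smaller side of the split (zeros on a tie).
import Mathlib
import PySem

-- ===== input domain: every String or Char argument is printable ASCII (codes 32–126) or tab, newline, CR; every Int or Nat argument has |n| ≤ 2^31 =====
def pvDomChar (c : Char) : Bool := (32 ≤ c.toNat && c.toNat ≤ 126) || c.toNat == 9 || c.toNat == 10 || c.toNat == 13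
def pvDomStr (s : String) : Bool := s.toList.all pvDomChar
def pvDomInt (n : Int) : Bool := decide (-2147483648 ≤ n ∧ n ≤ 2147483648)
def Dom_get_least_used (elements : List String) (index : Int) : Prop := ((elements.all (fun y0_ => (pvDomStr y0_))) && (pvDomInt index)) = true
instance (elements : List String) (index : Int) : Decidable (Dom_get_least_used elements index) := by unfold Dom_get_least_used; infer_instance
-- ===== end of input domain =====

-- B replaces A's one-pass dual-partition (dict of two lists) by stable-sort on the
-- bit at index, a boundary scan, and a slice of the smaller side; alternative algorithm.

-- ===== PORT A =====
-- A's dict {0: [], 1: []} of the two partitions is represented as a pair of lists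
-- (zeros group, ones group); appends and the final length comparison are literal.
def get_least_used (elements : List String) (index : Int) : List String :=
  let count := elements.foldl
    (fun (acc : List String × List String) elem =>
      if PySem.Str.pyGet? elem index == some '0' then (acc.1 ++ [elem], acc.2)
      else (acc.1, acc.2 ++ [elem]))
    ([], [])
  if count.1.length ≤ count.2.length then count.1 else count.2

-- ===== PORT B =====
-- Python's bool sort key (elem[index] != '0', False < True) is rendered as Nat 0/1.
def pvBoundary (index : Int) : List String → Nat
  | [] => 0
  | e :: rest =>
      if PySem.Str.pyGet? e index == some '0' then pvBoundary index rest + 1 else 0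

def get_least_used_alt (elements : List String) (index : Int) : List String :=
  let ordered := PySem.List.sorted elements
    (fun elem => if PySem.Str.pyGet? elem index == some '0' then (0 : Nat) else 1) false
  let n := ordered.length
  let k := pvBoundary index ordered
  if k ≤ n - k then PySem.List.slice ordered none (some (k : Int))
  else PySem.List.slice ordered (some (k : Int)) none

-- ===== PRECONDITION & SPEC =====
-- Python A evaluates elem[index] on every element; out-of-range raises IndexError.
def Pre_get_least_used (elements : List String) (index : Int) : Prop :=
  ∀ e ∈ elements, PySem.Raise.InRange e.toList.length index
instance (elements : List String) (index : Int) : Decidable (Pre_get_least_used elements index) := by unfold Pre_get_least_used; infer_instance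

def pvWitness_get_least_used : List String × Int := (["01", "10"], 0)

def Spec_get_least_used (elements : List String) (index : Int) (out : List String) : Prop := out = get_least_used_alt elements index
instance (elements : List String) (index : Int) (out : List String) : Decidable (Spec_get_least_used elements index out) := by unfold Spec_get_least_used; infer_instance

-- ===== CLAIM (what is proved, stated in full; the proofs are below) =====
def Claim_equal_get_least_used : Prop := ∀ (elements : List String) (index : Int), Dom_get_least_used elements index → Pre_get_least_used elements index → Spec_get_least_used elements index (get_least_used elements index)

-- ===== LEMMAS AND PROOFS =====

-- A's fold is the stable partition (zeros group, ones group).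
theorem pv_pairfold (p : String → Bool) :
    ∀ (l a b : List String),
      l.foldl (fun (acc : List String × List String) e =>
        if p e then (acc.1 ++ [e], acc.2) else (acc.1, acc.2 ++ [e])) (a, b)
      = (a ++ l.filter p, b ++ l.filter (fun e => !p e)) := by
  intro l
  induction l with
  | nil => intro a b; simp
  | cons x xs ih =>
    intro a b
    by_cases h : p x = true <;> simp [h, ih]

-- insertion into a list that starts with elements not `before` x and ends with
-- elements `before` x lands exactly at the boundary
theorem pv_insertBy_boundary {α : Type} (before : α → α → Bool) (x : α) :
    ∀ (A B : List α), (∀ a ∈ A, before x a = false) → (∀ b ∈ B, before x b = true) →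
      PySem.List.insertBy before x (A ++ B) = A ++ x :: B := by
  intro A
  induction A with
  | nil =>
    intro B _ hB
    cases B with
    | nil => simp [PySem.List.insertBy]
    | cons b bs => simp [PySem.List.insertBy, hB b (by simp)]
  | cons a A' ih =>
    intro B hA hB
    have ha : before x a = false := hA a (by simp)
    simp [PySem.List.insertBy, ha, ih B (fun y hy => hA y (by simp [hy])) hB]

-- stable insertion sort on the two-valued key 0/1 is the stable partition
theorem pv_foldl_insert_partition (p : String → Bool) :
    ∀ (l A B : List String), (∀ a ∈ A, p a = true) → (∀ b ∈ B, p b = false) →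
      l.foldl (fun acc x => PySem.List.insertBy
          (fun a b => decide ((if p a then (0 : Nat) else 1) < (if p b then (0 : Nat) else 1))) x acc)
        (A ++ B)
      = A ++ l.filter p ++ (B ++ l.filter (fun e => !p e)) := by
  intro l
  induction l with
  | nil => intro A B _ _; simp
  | cons x xs ih =>
    intro A B hA hB
    by_cases hx : p x = true
    · have hins : PySem.List.insertBy
          (fun a b => decide ((if p a then (0 : Nat) else 1) < (if p b then (0 : Nat) else 1))) x (A ++ B)
          = A ++ x :: B := by
        apply pv_insertBy_boundary
        · intro a ha; simp [hx, hA a ha]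
        · intro b hb; simp [hx, hB b hb]
      have hstep := ih (A ++ [x]) B
        (by intro a ha; rcases List.mem_append.mp ha with h | h
            · exact hA a h
            · simp at h; simpa [h] using hx) hB
      simp only [List.foldl_cons, hins]
      have : A ++ x :: B = (A ++ [x]) ++ B := by simp
      rw [this, hstep]
      simp [hx]
    · have hins : PySem.List.insertBy
          (fun a b => decide ((if p a then (0 : Nat) else 1) < (if p b then (0 : Nat) else 1))) x (A ++ B)
          = (A ++ B) ++ [x] := by
        apply PySem.List.insertBy_of_forall_not_before
        intro y _; simp [hx]; split <;> omega
      have hstep := ih A (B ++ [x]) hA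
        (by intro b hb; rcases List.mem_append.mp hb with h | h
            · exact hB b h
            · simp at h; subst h; simpa using hx)
      simp only [List.foldl_cons, hins, List.append_assoc] at hstep ⊢
      rw [hstep]
      simp [hx]
  
theorem pv_sorted_partition (p : String → Bool) (l : List String) :
    PySem.List.sorted l (fun e => if p e then (0 : Nat) else 1) false
      = l.filter p ++ l.filter (fun e => !p e) := by
  rw [PySem.List.sorted_eq_foldl_insertBy]
  have := pv_foldl_insert_partition p l [] [] (by simp) (by simp)
  simpa using this

theorem pv_boundary_append (index : Int) :
    ∀ (Z O : List String),
      (∀ e ∈ Z, (PySem.Str.pyGet? e index == some '0') = true) →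
      (∀ e ∈ O, (PySem.Str.pyGet? e index == some '0') = false) →
      pvBoundary index (Z ++ O) = Z.length := by
  intro Z
  induction Z with
  | nil =>
    intro O _ hO
    cases O with
    | nil => simp [pvBoundary]
    | cons o os =>
      have h := hO o (by simp)
      simp only [List.nil_append, pvBoundary, h]
      simp
  | cons z zs ih =>
    intro O hZ hO
    have hz := hZ z (by simp)
    simp only [List.cons_append, pvBoundary, hz]
    simp [ih O (fun e he => hZ e (by simp [he])) hO]

-- ===== VERDICT (by name: the statement is the Claim_ definition above) =====
theorem get_least_used_spec : Claim_equal_get_least_used := by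
  intro elements index _ _
  unfold Spec_get_least_used get_least_used get_least_used_alt
  set p : String → Bool := fun elem => PySem.Str.pyGet? elem index == some '0' with hp
  rw [pv_pairfold p elements [] []]
  simp only [List.nil_append]
  set Z := elements.filter p with hZ
  set O := elements.filter (fun e => !p e) with hO
  have hsort : PySem.List.sorted elements
      (fun elem => if PySem.Str.pyGet? elem index == some '0' then (0 : Nat) else 1) false
      = Z ++ O := by
    have := pv_sorted_partition p elements
    simpa [hp, hZ, hO] using this
  rw [hsort]
  have hbnd : pvBoundary index (Z ++ O) = Z.length := by
    apply pv_boundary_append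
    · intro e he; have := List.of_mem_filter he; simpa [hp] using this
    · intro e he; have := List.of_mem_filter he; simpa [hp] using this
  rw [hbnd]
  simp only [List.length_append]
  have hsub : Z.length + O.length - Z.length = O.length := by omega
  rw [hsub, PySem.List.slice_to_natCast, PySem.List.slice_from_natCast]
  have htake : (Z ++ O).take Z.length = Z := List.take_left ..
  have hdrop : (Z ++ O).drop Z.length = O := List.drop_left ..
  rw [htake, hdrop]
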